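-- pv_equiv track=rewrite | github.com/JoeMachado62/Personalized-Email-Marketing | sunbiz_csv_enricher.py | is_likely_address
-- ===== SOURCE A (Python) =====
-- def is_likely_address(text: str) -> bool:
--     """
--     Check if a text string is likely an address rather than a person's name.
--
--     Args:
--         text: String to check
--
--     Returns:
--         True if likely an address, False otherwise
--     """
--     if not text:
--         return False
--
--     text_upper = text.upper()
--
--     # Common address indicators
--     address_indicators = [
--         'AVE', 'AVENUE', 'ST', 'STREET', 'RD', 'ROAD', 'BLVD', 'BOULEVARD',
--         'DR', 'DRIVE', 'LN', 'LANE', 'CT', 'COURT', 'WAY', 'PKWY', 'PARKWAY',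
--         'PLAZA', 'CIRCLE', 'PLACE', 'TERR', 'TERRACE', 'TRAIL', 'HWY', 'HIGHWAY',
--         'SUITE', 'STE', 'APT', 'UNIT', 'NW', 'NE', 'SW', 'SE', 'NORTH', 'SOUTH',
--         'EAST', 'WEST'
--     ]
--
--     # Check for address indicators
--     for indicator in address_indicators:
--         if f' {indicator}' in text_upper or text_upper.endswith(f' {indicator}'):
--             return True
--
--     # Check if starts with a number (common for addresses)
--     if text and text[0].isdigit():
--         return True
--
--     return False
-- ===== SOURCE B (Python) =====
-- _INDICATORS = (
--     'AVE', 'AVENUE', 'ST', 'STREET', 'RD', 'ROAD', 'BLVD', 'BOULEVARD',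
--     'DR', 'DRIVE', 'LN', 'LANE', 'CT', 'COURT', 'WAY', 'PKWY', 'PARKWAY',
--     'PLAZA', 'CIRCLE', 'PLACE', 'TERR', 'TERRACE', 'TRAIL', 'HWY', 'HIGHWAY',
--     'SUITE', 'STE', 'APT', 'UNIT', 'NW', 'NE', 'SW', 'SE', 'NORTH', 'SOUTH',
--     'EAST', 'WEST'
-- )
--
--
-- def is_likely_address(text: str) -> bool:
--     if not text:
--         return False
--     if text[0].isdigit():
--         return True
--     upper = text.upper()
--     # single left-to-right pass: at each space, test the following suffix
--     # against all indicators at once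
--     for i, ch in enumerate(upper):
--         if ch == ' ' and upper[i + 1:].startswith(_INDICATORS):
--             return True
--     return False
-- ===== Notes on version B (the rewrite author's own statement) =====
-- stated objective: alternative
-- what changed: Instead of looping over ~37 indicators and running a substring search (plus a redundant endswith test) for each, B makes one left-to-right pass over the uppercased string and, at each space, tests the following suffix with a single tuple startswith; the leading-digit check is hoisted to the front.
import Mathlib
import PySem

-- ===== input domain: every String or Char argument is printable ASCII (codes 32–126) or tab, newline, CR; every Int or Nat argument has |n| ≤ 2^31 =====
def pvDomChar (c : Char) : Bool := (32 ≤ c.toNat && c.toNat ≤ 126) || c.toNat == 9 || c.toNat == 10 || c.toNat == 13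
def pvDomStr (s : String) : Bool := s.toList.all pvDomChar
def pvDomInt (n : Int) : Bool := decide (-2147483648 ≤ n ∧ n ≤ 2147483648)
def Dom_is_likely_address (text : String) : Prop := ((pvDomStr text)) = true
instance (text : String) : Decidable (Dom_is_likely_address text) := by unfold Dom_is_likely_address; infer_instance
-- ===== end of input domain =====

-- B makes one pass over the uppercased string (tuple-startswith at each space, digit check first)
-- instead of A's per-indicator substring scans; same value on every input ('alternative', not timed faster).

-- the shared literal table of address indicators (data, used by both ports)
def addressIndicators : List String :=
  ["AVE", "AVENUE", "ST", "STREET", "RD", "ROAD", "BLVD", "BOULEVARD",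
   "DR", "DRIVE", "LN", "LANE", "CT", "COURT", "WAY", "PKWY", "PARKWAY",
   "PLAZA", "CIRCLE", "PLACE", "TERR", "TERRACE", "TRAIL", "HWY", "HIGHWAY",
   "SUITE", "STE", "APT", "UNIT", "NW", "NE", "SW", "SE", "NORTH", "SOUTH",
   "EAST", "WEST"]

-- ===== PORT A =====
-- A's early-return loop over the indicator list: "f' {indicator}' in text_upper or text_upper.endswith(f' {indicator}')"
def aIndicatorLoop (tu : List Char) : List String → Bool
  | [] => false
  | ind :: rest =>
    if PySem.Chars.isIn (' ' :: ind.toList) tu || PySem.Chars.endswith tu (' ' :: ind.toList) then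
      true
    else
      aIndicatorLoop tu rest

def is_likely_address (text : String) : Bool :=
  match text.toList with
  | [] => false                                   -- if not text: return False
  | c :: _ =>
    let tu := (PySem.Str.upper text).toList       -- text_upper = text.upper()
    if aIndicatorLoop tu addressIndicators then true
    else if PySem.Chars.isdigit c then true       -- if text and text[0].isdigit(): return True
    else false

-- ===== PORT B =====
-- Source B: upper[i+1:].startswith(_INDICATORS) — tuple startswith
def bStartsAny (rest : List Char) : Bool :=
  addressIndicators.any (fun ind => PySem.Chars.startswith rest ind.toList)

-- Source B's single pass over the uppercased characters: at each space, tuple-startswith on the suffix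
def bScan : List Char → Bool
  | [] => false
  | c :: rest => (c == ' ' && bStartsAny rest) || bScan rest

def is_likely_address_alt (text : String) : Bool :=
  match text.toList with
  | [] => false                                   -- if not text: return False
  | c :: _ =>
    if PySem.Chars.isdigit c then true            -- if text[0].isdigit(): return True
    else bScan (PySem.Str.upper text).toList

-- ===== PRECONDITION & SPEC =====
def Spec_is_likely_address (text : String) (out : Bool) : Prop := out = is_likely_address_alt text
instance (text : String) (out : Bool) : Decidable (Spec_is_likely_address text out) := by unfold Spec_is_likely_address; infer_instance

-- ===== CLAIM (what is proved, stated in full; the proofs are below) =====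
def Claim_equal_is_likely_address : Prop := ∀ (text : String), Dom_is_likely_address text → Spec_is_likely_address text (is_likely_address text)

-- ===== LEMMAS AND PROOFS =====

-- A's loop finds some indicator occurring as a space-prefixed substring
-- (the endswith disjunct is absorbed: a suffix is in particular an infix).
theorem aIndicatorLoop_eq_true_iff (tu : List Char) (inds : List String) :
    aIndicatorLoop tu inds = true ↔ ∃ s ∈ inds, (' ' :: s.toList) <:+: tu := by
  induction inds with
  | nil => simp [aIndicatorLoop]
  | cons ind rest ih =>
    simp only [aIndicatorLoop]
    split_ifs with h
    · simp only [true_iff]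
      rcases Bool.or_eq_true_iff.mp h with h' | h'
      · exact ⟨ind, List.mem_cons_self, (PySem.Chars.isIn_iff_infix _ _).mp h'⟩
      · exact ⟨ind, List.mem_cons_self, ((PySem.Chars.endswith_iff _ _).mp h').isInfix⟩
    · rw [ih]
      constructor
      · rintro ⟨s, hs, hinf⟩; exact ⟨s, List.mem_cons_of_mem _ hs, hinf⟩
      · rintro ⟨s, hs, hinf⟩
        rcases List.mem_cons.mp hs with rfl | hs'
        · exact absurd (Bool.or_eq_true_iff.mpr
            (Or.inl ((PySem.Chars.isIn_iff_infix _ _).mpr hinf))) h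
        · exact ⟨s, hs', hinf⟩

theorem bStartsAny_eq_true_iff (rest : List Char) :
    bStartsAny rest = true ↔ ∃ s ∈ addressIndicators, s.toList <+: rest := by
  simp [bStartsAny, List.any_eq_true, PySem.Chars.startswith_iff]

-- B's scan fires exactly when some suffix of the list starts with a space followed by an indicator
theorem bScan_eq_true_iff (l : List Char) :
    bScan l = true ↔ ∃ r, (' ' :: r) <:+ l ∧ bStartsAny r = true := by
  induction l with
  | nil => simp [bScan]
  | cons c rest ih =>
    simp only [bScan, Bool.or_eq_true, Bool.and_eq_true, beq_iff_eq, ih]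
    constructor
    · rintro (⟨rfl, hb⟩ | ⟨r, hr, hb⟩)
      · exact ⟨rest, List.suffix_refl _, hb⟩
      · exact ⟨r, hr.trans (List.suffix_cons c rest), hb⟩
    · rintro ⟨r, hr, hb⟩
      rcases List.suffix_cons_iff.mp hr with h | h
      · rcases List.cons.injEq .. ▸ h with ⟨h1, h2⟩
        exact Or.inl ⟨h1.symm, h2 ▸ hb⟩
      · exact Or.inr ⟨r, h, hb⟩

-- the two loop shapes agree on every character list
theorem bScan_eq_aIndicatorLoop (l : List Char) :
    bScan l = aIndicatorLoop l addressIndicators := by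
  rw [Bool.eq_iff_iff, bScan_eq_true_iff, aIndicatorLoop_eq_true_iff]
  constructor
  · rintro ⟨r, hsuf, hb⟩
    rcases (bStartsAny_eq_true_iff r).mp hb with ⟨s, hs, hpre⟩
    exact ⟨s, hs, (List.cons_prefix_cons.mpr ⟨rfl, hpre⟩).isInfix.trans hsuf.isInfix⟩
  · rintro ⟨s, hs, hinf⟩
    rcases hinf with ⟨pre, post, hl⟩
    refine ⟨s.toList ++ post, ⟨pre, by simpa using hl⟩, ?_⟩
    exact (bStartsAny_eq_true_iff _).mpr ⟨s, hs, List.prefix_append _ _⟩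

-- ===== VERDICT (by name: the statement is the Claim_ definition above) =====
theorem is_likely_address_spec : Claim_equal_is_likely_address := by
  intro text _
  unfold Spec_is_likely_address is_likely_address is_likely_address_alt
  cases h : text.toList with
  | nil => rfl
  | cons c rest =>
    simp only [bScan_eq_aIndicatorLoop]
    by_cases hl : aIndicatorLoop (PySem.Str.upper text).toList addressIndicators = true <;>
      by_cases hd : PySem.Chars.isdigit c = true <;>
      simp [hd]
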